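-- pv_equiv track=rewrite | github.com/revnaltinoz/Group_26-1 | ScalingReal.py | merge_names
-- ===== SOURCE A (Python) =====
-- def merge_names(names):
--     if ';' in names:
--         # Virgülle ayrılmış isimleri işle
--         name_list = names.split(';')
--         merged_names = []
--         for name in name_list:
--             # Boşlukları kaldırarak isim ve soyisimleri birleştir
--             merged_names.append(''.join(name.split()))
--         return ''.join(merged_names)
--     else:
--         # Tek bir isim varsa boşlukları kaldırarak birleştir
--         return ''.join(names.split())
-- ===== SOURCE B (Python) =====
-- def merge_names(names):
--     return ''.join(ch for ch in names if ch != ';' and not ch.isspace())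
-- ===== Notes on version B (the rewrite author's own statement) =====
-- stated objective: simpler
-- what changed: Replaced the semicolon branch with its split/split/join passes by a single character-level filter that drops semicolons and whitespace in one pass.
import Mathlib
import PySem

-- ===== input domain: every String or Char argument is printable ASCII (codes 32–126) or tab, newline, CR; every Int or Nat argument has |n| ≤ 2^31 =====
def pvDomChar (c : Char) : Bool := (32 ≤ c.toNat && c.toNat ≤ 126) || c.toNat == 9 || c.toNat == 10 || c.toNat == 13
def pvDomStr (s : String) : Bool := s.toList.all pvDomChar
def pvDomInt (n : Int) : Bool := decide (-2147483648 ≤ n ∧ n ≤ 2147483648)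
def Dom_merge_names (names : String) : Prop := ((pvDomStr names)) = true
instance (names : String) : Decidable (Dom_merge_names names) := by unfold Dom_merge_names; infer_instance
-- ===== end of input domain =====

-- B replaces A's ';'-branch with split/join passes by one character-level filter (simpler decomposition).

-- ===== PORT A =====
-- Literal transliteration of A (string ops on the char-list side, as PySem defines them).
def merge_names (names : String) : String :=
  if PySem.Str.isIn ";" names then
    -- name_list = names.split(';')
    let name_list := PySem.Chars.splitOn names.toList [';']
    -- for name in name_list: merged_names.append(''.join(name.split()))
    let merged_names := name_list.foldl
      (fun acc name => acc ++ [PySem.Chars.join [] (PySem.Chars.split₀ name)]) []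
    -- return ''.join(merged_names)
    String.ofList (PySem.Chars.join [] merged_names)
  else
    -- return ''.join(names.split())
    String.ofList (PySem.Chars.join [] (PySem.Chars.split₀ names.toList))

-- ===== PORT B =====
-- ''.join(ch for ch in names if ch != ';' and not ch.isspace())
def merge_names_alt (names : String) : String :=
  String.ofList (names.toList.filter (fun c => !(c == ';') && !PySem.Chars.isspace c))

-- ===== PRECONDITION & SPEC =====
def Spec_merge_names (names : String) (out : String) : Prop := out = merge_names_alt names
instance (names : String) (out : String) : Decidable (Spec_merge_names names out) := by unfold Spec_merge_names; infer_instance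

-- ===== CLAIM (what is proved, stated in full; the proofs are below) =====
def Claim_equal_merge_names : Prop := ∀ (names : String), Dom_merge_names names → Spec_merge_names names (merge_names names)

-- ===== LEMMAS AND PROOFS =====

-- ''.join on the char side is just flatten.
theorem join_nil_eq_flatten (parts : List (List Char)) :
    PySem.Chars.join [] parts = parts.flatten := by
  simp only [PySem.Chars.join]
  induction parts with
  | nil => rfl
  | cons x xs ih =>
    cases xs with
    | nil => simp [List.intercalate]
    | cons y ys =>
      simp only [List.intercalate, List.intersperse_cons₂, List.flatten_cons] at *
      simp [ih]

-- Flattening str.split() keeps exactly the non-whitespace characters.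
theorem split₀_go_flatten (s cur : List Char) (acc : List (List Char)) :
    (PySem.Chars.split₀.go s cur acc).flatten
      = acc.reverse.flatten ++ cur.reverse ++ s.filter (fun c => !PySem.Chars.isspace c) := by
  induction s generalizing cur acc with
  | nil =>
    by_cases h : cur = []
    · simp [PySem.Chars.split₀.go, h]
    · simp [PySem.Chars.split₀.go, List.isEmpty_iff, h]
  | cons c rest ih =>
    by_cases hs : PySem.Chars.isspace c = true
    · by_cases h : cur = []
      · simp [PySem.Chars.split₀.go, hs, h, ih]
      · simp [PySem.Chars.split₀.go, hs, List.isEmpty_iff, h, ih]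
    · simp [PySem.Chars.split₀.go, hs, ih]

theorem split₀_flatten (s : List Char) :
    (PySem.Chars.split₀ s).flatten = s.filter (fun c => !PySem.Chars.isspace c) := by
  simpa using split₀_go_flatten s [] []

-- Flattening s.split(';') keeps exactly the non-';' characters.
theorem splitOn_semi_go_flatten (fuel : Nat) (l cur : List Char) (acc : List (List Char)) (h : l.length ≤ fuel) :
    (PySem.Chars.splitOn.go [';'] fuel l cur acc).flatten
      = acc.reverse.flatten ++ cur.reverse ++ l.filter (fun c => !(c == ';')) := by
  induction fuel generalizing l cur acc with
  | zero =>
    have : l = [] := List.length_eq_zero_iff.mp (Nat.le_zero.mp h)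
    subst this
    simp [PySem.Chars.splitOn.go]
  | succ fuel ih =>
    cases l with
    | nil => simp [PySem.Chars.splitOn.go]
    | cons c rest =>
      by_cases hc : c = ';'
      · subst hc
        have hpre : [';'].isPrefixOf (';' :: rest) = true := by simp [List.isPrefixOf]
        simp only [PySem.Chars.splitOn.go, hpre, if_true, List.length_cons,
          List.length_nil, Nat.zero_add, List.drop_succ_cons, List.drop_zero] at *
        rw [ih rest [] (cur.reverse :: acc) (by omega)]
        simp
      · have hpre : [';'].isPrefixOf (c :: rest) = false := by
          simp [List.isPrefixOf]
          exact fun h' => hc h'.symm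
        simp only [PySem.Chars.splitOn.go, hpre, Bool.false_eq_true, if_false] at *
        rw [ih rest (c :: cur) acc (by simpa using Nat.le_of_succ_le_succ (by simpa using h))]
        simp [hc]

theorem splitOn_semi_flatten (s : List Char) :
    (PySem.Chars.splitOn s [';']).flatten = s.filter (fun c => !(c == ';')) := by
  simpa [PySem.Chars.splitOn] using
    splitOn_semi_go_flatten (s.length + 1) s [] [] (by omega)

-- ===== VERDICT (by name: the statement is the Claim_ definition above) =====
theorem merge_names_spec : Claim_equal_merge_names := by
  intro names _
  unfold Spec_merge_names merge_names merge_names_alt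
  by_cases h : PySem.Str.isIn ";" names = true
  · simp only [h, if_true]
    rw [PySem.List.foldl_append_singleton_eq_map]
    congr 1
    rw [join_nil_eq_flatten, List.nil_append]
    have hmap : (PySem.Chars.splitOn names.toList [';']).map
          (fun name => PySem.Chars.join [] (PySem.Chars.split₀ name))
        = (PySem.Chars.splitOn names.toList [';']).map
            (List.filter (fun c => !PySem.Chars.isspace c)) := by
      apply List.map_congr_left
      intro name _
      rw [join_nil_eq_flatten, split₀_flatten]
    rw [hmap, ← List.filter_flatten, splitOn_semi_flatten, List.filter_filter]
    apply List.filter_congr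
    intro c _
    rw [Bool.and_comm]
  · simp only [h, Bool.false_eq_true, if_false]
    congr 1
    rw [join_nil_eq_flatten, split₀_flatten]
    apply List.filter_congr
    intro c hc
    have hne : ¬ (c = ';') := by
      intro hceq
      subst hceq
      have : [';'] <:+: names.toList :=
        (List.singleton_infix_iff _ _).mpr (by simpa using hc)
      have := (PySem.Str.isIn_iff_infix (sub := ";") (s := names)).mpr (by simpa using this)
      exact h this
    simp [hne]
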